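-- pv_equiv track=rewrite | github.com/kos-sandra/learning | acmp/acmp_task_213.py | result_of_attempts
-- ===== SOURCE A (Python) =====
-- def mult(a,b):
--     return a*b
--
-- def result_of_attempts(submitted_attempts, tests_points, extra_points):
--     sum_points_for_attempts = []
--     m = len(submitted_attempts)
--     for i in range(m):
--         points_for_attempt = map(mult, submitted_attempts[i], tests_points)
--         sum_points_for_attempts.append(sum(points_for_attempt))
--
--     for i in range(m):
--         if all(x == 1 for x in submitted_attempts[i]):
--             sum_points_for_attempts[i] += extra_points
--
--     return sum_points_for_attempts
-- ===== SOURCE B (Python) =====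
-- def result_of_attempts(submitted_attempts, tests_points, extra_points):
--     # Column-major accumulation: start each total with its bonus, then sweep
--     # over the columns (test-point positions), adding each column's
--     # contribution to every attempt that is long enough.  Columns beyond the
--     # longest attempt contribute nothing, so the sweep stops at the longest
--     # attempt.  Order of summation differs from A's row-wise dot products but
--     # the totals are identical.
--     totals = [extra_points if all(x == 1 for x in attempt) else 0
--               for attempt in submitted_attempts]
--     width = max(map(len, submitted_attempts), default=0)
--     for j in range(min(width, len(tests_points))):
--         p = tests_points[j]
--         for i, attempt in enumerate(submitted_attempts):
--             if j < len(attempt):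
--                 totals[i] += attempt[j] * p
--     return totals
-- ===== Notes on version B (the rewrite author's own statement) =====
-- stated objective: alternative
-- what changed: Replaces A's row-wise dot products (per-attempt map/sum, then a second indexed pass adding bonuses) with a column-major sweep: totals start at the bonus value and each column up to the longest attempt adds its contribution to all attempts' totals, relying on commutativity of addition.
import Mathlib
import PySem

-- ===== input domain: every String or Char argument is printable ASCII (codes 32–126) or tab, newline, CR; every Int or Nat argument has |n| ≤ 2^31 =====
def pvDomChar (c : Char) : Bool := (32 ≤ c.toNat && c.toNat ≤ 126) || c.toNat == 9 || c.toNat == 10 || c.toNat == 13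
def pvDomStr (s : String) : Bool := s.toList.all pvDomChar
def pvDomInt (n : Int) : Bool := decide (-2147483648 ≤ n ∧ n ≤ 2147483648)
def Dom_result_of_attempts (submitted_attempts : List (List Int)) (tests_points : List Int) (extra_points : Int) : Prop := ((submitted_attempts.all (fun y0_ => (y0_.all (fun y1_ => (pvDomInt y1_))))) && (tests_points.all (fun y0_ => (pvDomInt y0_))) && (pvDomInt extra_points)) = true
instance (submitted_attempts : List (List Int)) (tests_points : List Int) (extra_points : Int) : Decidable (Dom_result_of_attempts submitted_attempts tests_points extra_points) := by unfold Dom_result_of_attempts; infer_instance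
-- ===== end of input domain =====

-- B replaces A's row-wise dot products with a column-major sweep over the test points (alternative traversal; same cost).

-- ===== PORT A =====
-- two passes: build the list of per-attempt dot products by index, then re-scan by index adding the bonus in place
def result_of_attempts (submitted_attempts : List (List Int)) (tests_points : List Int) (extra_points : Int) : List Int :=
  let m := submitted_attempts.length
  let sums := (List.range m).foldl
    (fun acc i => acc ++ [(List.zipWith (fun a b => a * b) (submitted_attempts.getD i []) tests_points).sum]) []
  (List.range m).foldl
    (fun acc i =>
      if (submitted_attempts.getD i []).all (fun x => x == 1)
      then acc.set i (acc.getD i 0 + extra_points) else acc) sums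

-- ===== PORT B =====
-- column-major: totals start at the bonus, then each column up to the longest attempt is added to every long-enough attempt
def result_of_attempts_alt (submitted_attempts : List (List Int)) (tests_points : List Int) (extra_points : Int) : List Int :=
  let totals := submitted_attempts.map
    (fun attempt => if attempt.all (fun x => x == 1) then extra_points else 0)
  let width := (submitted_attempts.map List.length).foldl max 0
  (List.range (min width tests_points.length)).foldl
    (fun tot j =>
      let p := tests_points.getD j 0
      submitted_attempts.zipIdx.foldl
        (fun tot2 ai =>
          if j < ai.1.length then
            tot2.set ai.2 (tot2.getD ai.2 0 + ai.1.getD j 0 * p)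
          else tot2) tot) totals

-- ===== PRECONDITION & SPEC =====
def Spec_result_of_attempts (submitted_attempts : List (List Int)) (tests_points : List Int) (extra_points : Int) (out : List Int) : Prop := out = result_of_attempts_alt submitted_attempts tests_points extra_points
instance (submitted_attempts : List (List Int)) (tests_points : List Int) (extra_points : Int) (out : List Int) : Decidable (Spec_result_of_attempts submitted_attempts tests_points extra_points out) := by unfold Spec_result_of_attempts; infer_instance

-- ===== CLAIM (what is proved, stated in full; the proofs are below) =====
def Claim_equal_result_of_attempts : Prop := ∀ (submitted_attempts : List (List Int)) (tests_points : List Int) (extra_points : Int), Dom_result_of_attempts submitted_attempts tests_points extra_points → Spec_result_of_attempts submitted_attempts tests_points extra_points (result_of_attempts submitted_attempts tests_points extra_points)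

-- ===== LEMMAS AND PROOFS =====

-- a foldl that only appends singletons is a map
theorem foldl_append_singleton {α β : Type} (f : α → β) :
    ∀ (l : List α) (init : List β),
      l.foldl (fun acc x => acc ++ [f x]) init = init ++ l.map f := by
  intro l
  induction l with
  | nil => simp
  | cons x xs ih => intro init; simp [List.foldl_cons, ih]

-- mapping a function of the i-th element over range (length) is mapping over the list
theorem range_map_getD {α β : Type} (F : α → β) (d : α) :
    ∀ (l : List α), (List.range l.length).map (fun i => F (l.getD i d)) = l.map F := by
  intro l
  induction l with
  | nil => simp
  | cons x xs ih =>
      simp only [List.length_cons, List.range_succ_eq_map, List.map_cons, List.map_map]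
      simp only [List.getD_cons_zero]
      exact congrArg (F x :: ·) (ih)

-- the in-place-update loop over range is a mapIdx
theorem set_loop_mapIdx (ep : Int) (q : Nat → Bool) :
    ∀ (acc done : List Int),
      (List.range' done.length acc.length).foldl
          (fun l i => if q i then l.set i (l.getD i 0 + ep) else l) (done ++ acc)
        = done ++ acc.mapIdx (fun i v => if q (done.length + i) then v + ep else v) := by
  intro acc
  induction acc with
  | nil => intro done; simp
  | cons v vs ih =>
      intro done
      have hset : ∀ w : Int, (done ++ v :: vs).set done.length w = done ++ w :: vs := by
        intro w
        rw [List.set_append]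
        simp
      have step :
          (if q done.length then (done ++ v :: vs).set done.length ((done ++ v :: vs).getD done.length 0 + ep) else (done ++ v :: vs))
            = done ++ (if q done.length then v + ep else v) :: vs := by
        have hget : (done ++ v :: vs).getD done.length 0 = v := by
          simp [List.getD_eq_getElem?_getD]
        by_cases h : q done.length = true
        · simp [h, hset]
        · simp [h]
      have : List.range' done.length (v :: vs).length
          = done.length :: List.range' (done.length + 1) vs.length := by
        simp [List.range'_succ]
      rw [this, List.foldl_cons, step]
      have ih' := ih (done ++ [if q done.length then v + ep else v])
      simp only [List.length_append, List.length_cons, List.length_nil, List.append_assoc,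
        List.cons_append, List.nil_append, Nat.zero_add] at ih'
      rw [ih', List.mapIdx_cons]
      simp only [Nat.add_zero]
      have hfun : (fun (i : Nat) (v' : Int) => if q (done.length + 1 + i) then v' + ep else v')
          = (fun (i : Nat) (v' : Int) => if q (done.length + (i + 1)) then v' + ep else v') := by
        funext i v'
        rw [Nat.add_assoc, Nat.add_comm 1 i]
      rw [hfun]

-- mapIdx with the test looked up by index over a mapped list collapses to a single map
theorem mapIdx_map_collapse (G : List Int → Int) (p : List Int → Bool) (ep : Int) :
    ∀ (sa : List (List Int)),
      (sa.map G).mapIdx (fun i v => if p (sa.getD i []) then v + ep else v)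
        = sa.map (fun a => if p a then G a + ep else G a) := by
  intro sa
  induction sa with
  | nil => simp
  | cons a sa ih =>
      simp only [List.map_cons, List.mapIdx_cons, List.getD_cons_zero, List.getD_cons_succ, ih]

-- B's inner loop (one column j with point p) updates each slot once, in order: it is a zipWith
theorem inner_loop_zipWith (j : Nat) (p : Int) :
    ∀ (sa : List (List Int)) (totals done : List Int), totals.length = sa.length →
      (sa.zipIdx done.length).foldl
          (fun tot2 ai =>
            if j < ai.1.length then
              tot2.set ai.2 (tot2.getD ai.2 0 + ai.1.getD j 0 * p)
            else tot2) (done ++ totals)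
        = done ++ List.zipWith
            (fun t a => if j < a.length then t + a.getD j 0 * p else t) totals sa := by
  intro sa
  induction sa with
  | nil =>
      intro totals done h
      have : totals = [] := List.eq_nil_of_length_eq_zero h
      simp [this]
  | cons a sa ih =>
      intro totals done h
      cases totals with
      | nil => simp at h
      | cons t ts' =>
          have hlen : ts'.length = sa.length := by simpa using h
          have hget : (done ++ t :: ts').getD done.length 0 = t := by
            simp [List.getD_eq_getElem?_getD]
          have hset : ∀ w : Int, (done ++ t :: ts').set done.length w = done ++ w :: ts' := by
            intro w
            rw [List.set_append]
            simp
          have step :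
              (if j < a.length then
                (done ++ t :: ts').set done.length ((done ++ t :: ts').getD done.length 0 + a.getD j 0 * p)
              else (done ++ t :: ts'))
                = done ++ (if j < a.length then t + a.getD j 0 * p else t) :: ts' := by
            by_cases hj : j < a.length
            · simp [hj, hset]
            · simp [hj]
          rw [List.zipIdx_cons, List.foldl_cons]
          simp only []
          rw [step]
          have ih' := ih ts' (done ++ [if j < a.length then t + a.getD j 0 * p else t]) hlen
          simp only [List.length_append, List.length_cons, List.length_nil, List.append_assoc,
            List.cons_append, List.nil_append, Nat.zero_add] at ih'
          rw [List.zipWith_cons_cons]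
          exact ih'

-- zipWith of a mapped list against the list itself is a single map
theorem zipWith_map_same {α β γ : Type} (f : β → α → γ) (g : α → β) :
    ∀ (l : List α), List.zipWith f (l.map g) l = l.map (fun a => f (g a) a) := by
  intro l
  induction l with
  | nil => rfl
  | cons x xs ih => simp [ih]

-- the fold seed is a lower bound of a max-fold
theorem foldl_max_init_le : ∀ (l : List Nat) (init : Nat), init ≤ l.foldl max init := by
  intro l
  induction l with
  | nil => intro init; simp
  | cons y ys ih => intro init; exact le_trans (Nat.le_max_left init y) (ih (max init y))

-- every member is below the max-fold
theorem mem_le_foldl_max : ∀ (l : List Nat) (x : Nat), x ∈ l → ∀ init, x ≤ l.foldl max init := by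
  intro l
  induction l with
  | nil => intro x hx; cases hx
  | cons y ys ih =>
      intro x hx init
      rcases List.mem_cons.mp hx with h | h
      · subst h; exact le_trans (Nat.le_max_right init x) (foldl_max_init_le ys (max init x))
      · exact ih x h (max init y)

-- zipping against a prefix of the second list is a prefix of the zip
theorem zipWith_take_right {α β γ : Type} (f : α → β → γ) :
    ∀ (l : List α) (l' : List β) (k : Nat),
      List.zipWith f l (l'.take k) = (List.zipWith f l l').take k := by
  intro l
  induction l with
  | nil => intro l' k; simp
  | cons x xs ih =>
      intro l' k
      cases l' with
      | nil => simp
      | cons y ys =>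
          cases k with
          | zero => simp
          | succ k => simp [ih]

-- B's outer column sweep over columns j, …, j+k-1 accumulates that block's dot-product contribution of each row
theorem outer_sweep (sa : List (List Int)) (ts : List Int) :
    ∀ (k j : Nat) (g : List Int → ℤ), j + k ≤ ts.length →
      (List.range' j k).foldl
          (fun tot j' =>
            sa.zipIdx.foldl
              (fun tot2 ai =>
                if j' < ai.1.length then
                  tot2.set ai.2 (tot2.getD ai.2 0 + ai.1.getD j' 0 * ts.getD j' 0)
                else tot2) tot) (sa.map g)
        = sa.map (fun a => g a + (List.zipWith (fun x p => x * p) (a.drop j) ((ts.drop j).take k)).sum) := by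
  intro k
  induction k with
  | zero => intro j g _; simp
  | succ k ih =>
      intro j g hle
      rw [List.range'_succ, List.foldl_cons]
      have h1 : sa.zipIdx.foldl
          (fun tot2 ai =>
            if j < ai.1.length then
              tot2.set ai.2 (tot2.getD ai.2 0 + ai.1.getD j 0 * ts.getD j 0)
            else tot2) (sa.map g)
          = sa.map (fun a => if j < a.length then g a + a.getD j 0 * ts.getD j 0 else g a) := by
        have := inner_loop_zipWith j (ts.getD j 0) sa (sa.map g) [] (by simp)
        simp only [List.nil_append, List.length_nil] at this
        rw [this, zipWith_map_same (fun t a => if j < a.length then t + a.getD j 0 * ts.getD j 0 else t) g sa]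
      rw [h1, ih (j + 1) (fun a => if j < a.length then g a + a.getD j 0 * ts.getD j 0 else g a) (by omega)]
      apply congrArg (sa.map ·)
      funext a
      have hjts : j < ts.length := by omega
      have hts : ts.drop j = ts[j] :: ts.drop (j + 1) := List.drop_eq_getElem_cons hjts
      by_cases hj : j < a.length
      · have hdrop : a.drop j = a[j] :: a.drop (j + 1) := List.drop_eq_getElem_cons hj
        have hgd : a.getD j 0 = a[j] := by
          simp [List.getD_eq_getElem?_getD, List.getElem?_eq_getElem hj]
        have hgt : ts.getD j 0 = ts[j] := by
          simp [List.getD_eq_getElem?_getD, List.getElem?_eq_getElem hjts]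
        rw [hts, hdrop, List.take_succ_cons, List.zipWith_cons_cons, List.sum_cons]
        simp only [hj, if_pos, hgd, hgt]
        ring
      · have h1 : a.drop j = [] := List.drop_eq_nil_of_le (Nat.le_of_not_lt hj)
        have h2 : a.drop (j + 1) = [] := List.drop_eq_nil_of_le (by omega)
        simp [hj, h1, h2]

-- a row no longer than the sweep width zips identically against the truncated and the full test-point list
theorem zip_full_of_le_width (ts : List Int) (w : Nat) (a : List Int) (ha : a.length ≤ w) :
    List.zipWith (fun x p => x * p) a (ts.take (min w ts.length))
      = List.zipWith (fun x p => x * p) a ts := by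
  rw [zipWith_take_right]
  apply List.take_of_length_le
  rw [List.length_zipWith]
  omega

-- ===== VERDICT (by name: the statement is the Claim_ definition above) =====
theorem result_of_attempts_spec : Claim_equal_result_of_attempts := by
  intro sa ts ep _
  unfold Spec_result_of_attempts result_of_attempts result_of_attempts_alt
  simp only []
  -- A's first pass is a map of dot products
  rw [foldl_append_singleton
      (fun i => (List.zipWith (fun a b => a * b) (sa.getD i []) ts).sum) (List.range sa.length) []]
  simp only [List.nil_append]
  rw [range_map_getD (fun a => (List.zipWith (fun a b => a * b) a ts).sum) [] sa]
  -- A's second pass is a mapIdx over that map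
  have h2 := set_loop_mapIdx ep (fun i => (sa.getD i []).all (fun x => x == 1))
      (sa.map (fun a => (List.zipWith (fun a b => a * b) a ts).sum)) []
  simp only [List.length_nil, List.nil_append, Nat.zero_add, List.length_map] at h2
  rw [show List.range sa.length = List.range' 0 sa.length by simp [List.range_eq_range']]
  rw [h2]
  rw [mapIdx_map_collapse (fun a => (List.zipWith (fun a b => a * b) a ts).sum)
      (fun a => a.all (fun x => x == 1)) ep sa]
  -- B's column sweep accumulates the same dot products on top of the bonus seeds
  rw [show List.range (min ((sa.map List.length).foldl max 0) ts.length)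
        = List.range' 0 (min ((sa.map List.length).foldl max 0) ts.length) by
      simp [List.range_eq_range']]
  rw [outer_sweep sa ts (min ((sa.map List.length).foldl max 0) ts.length) 0
      (fun attempt => if attempt.all (fun x => x == 1) then ep else 0) (by omega)]
  simp only [List.drop_zero]
  apply List.map_congr_left
  intro a ha
  rw [zip_full_of_le_width ts ((sa.map List.length).foldl max 0) a
      (mem_le_foldl_max (sa.map List.length) a.length (List.mem_map_of_mem ha) 0)]
  by_cases h : a.all (fun x => x == 1)
  · simp only [h, if_pos]; ring
  · simp [h]
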